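-- pv_equiv track=rewrite | github.com/Daishijun/InterviewAlgorithmCoding | leetcodePrac/wordSplit.py | segmentUnion
-- ===== SOURCE A (Python) =====
-- def segmentUnion(string, dic):
--     targetlength = len(string)
--     if 0 not in dic.keys():
--         return False
--     posstack = [0]
--     while posstack:
--         cur = posstack.pop()
--         if cur == targetlength:
--             return True
--         if cur in dic.keys():
--             posstack = posstack + dic[cur]
--     return False
-- ===== SOURCE B (Python) =====
-- def segmentUnion(string, dic):
--     # Level-by-level set saturation (fixpoint of the successor relation) instead
--     # of A's visited-less DFS stack; A's exploration never expands the end position,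
--     # so positions equal to len(string) are not expanded here either.
--     n = len(string)
--     if 0 not in dic:
--         return False
--     reach = {0}
--     frontier = {0}
--     while frontier:
--         nxt = set()
--         for c in frontier:
--             if c != n:
--                 for j in dic.get(c, ()):
--                     if j not in reach:
--                         nxt.add(j)
--         reach |= nxt
--         frontier = nxt
--     return n in reach
-- ===== Notes on version B (the rewrite author's own statement) =====
-- stated objective: alternative
-- what changed: A's visited-less DFS on a growing stack (which re-enumerates whole paths and can diverge on cycles) is replaced by a level-by-level set-saturation fixpoint: a frontier of newly reached positions is expanded once per round into a reached set until no new position appears, then the end position's membership is returned.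
-- outside the precondition, e.g. on segmentUnion('xx', {0: [1, 2], 1: [1]}): A returns True, B returns True; on segmentUnion('xx', {0: [2], 1: [1]}): A returns True, B returns True; on segmentUnion('xx', {0: [1], 1: [1]}): A does not finish within the time limit, B returns False
import Mathlib
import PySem

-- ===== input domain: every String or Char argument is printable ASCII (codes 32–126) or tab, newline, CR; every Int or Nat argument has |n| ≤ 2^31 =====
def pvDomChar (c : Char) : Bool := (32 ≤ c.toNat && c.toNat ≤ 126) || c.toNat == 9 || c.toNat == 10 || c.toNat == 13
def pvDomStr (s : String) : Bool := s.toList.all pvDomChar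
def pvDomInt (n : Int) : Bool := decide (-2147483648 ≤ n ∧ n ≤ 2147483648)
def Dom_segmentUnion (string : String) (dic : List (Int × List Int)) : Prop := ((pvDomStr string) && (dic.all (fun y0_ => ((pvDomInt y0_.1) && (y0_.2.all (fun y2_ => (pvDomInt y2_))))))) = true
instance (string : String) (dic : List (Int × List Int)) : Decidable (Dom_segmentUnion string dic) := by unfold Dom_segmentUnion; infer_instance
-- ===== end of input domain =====

-- B replaces A's visited-less DFS stack (which re-enumerates whole paths) by a
-- level-by-level set-saturation fixpoint over the position graph (alternative
-- algorithm; equivalence is claimed on cycle-free position graphs, see Pre_).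

-- ===== PORT A =====
-- Python dict lookup (first match on the association list).
def pvLookup (dic : List (Int × List Int)) (c : Int) : Option (List Int) :=
  (PySem.Dict.mk dic).get? c

-- dic.get(c, []) — the successor positions of c
def pvSuccs (dic : List (Int × List Int)) (c : Int) : List Int :=
  (pvLookup dic c).getD []

-- the while-loop of A; the fuel only makes it total (Pre_ proves it is never exhausted)
def segLoopA (dic : List (Int × List Int)) (n : Int) : Nat → List Int → Bool
  | 0, _ => false
  | _ + 1, [] => false
  | f + 1, x :: xs =>
      let cur := (x :: xs).getLast (List.cons_ne_nil x xs)   -- cur = posstack.pop()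
      let rest := (x :: xs).dropLast
      if cur = n then true
      else match pvLookup dic cur with
        | some js => segLoopA dic n f (rest ++ js)           -- posstack = posstack + dic[cur]
        | none => segLoopA dic n f rest

def pvVals (dic : List (Int × List Int)) : List Int := dic.flatMap (fun p => p.2)

-- one more than the number of value occurrences: B's reached set never exceeds it
def pvBound (dic : List (Int × List Int)) : Nat := (pvVals dic).length + 1

def pvKeys (dic : List (Int × List Int)) : List Int := dic.map Prod.fst

-- enough peeling rounds / one more than the longest possible simple path
def pvRounds (dic : List (Int × List Int)) : Nat := (pvKeys dic ++ pvVals dic).length + 1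
def pvChainBnd (dic : List (Int × List Int)) : Nat := pvRounds dic + 1

-- the largest successor-list length
def pvMaxDeg (dic : List (Int × List Int)) : Nat :=
  (dic.map (fun p => p.2.length)).foldl max 0

-- fuel bound: on a cycle-free graph (Pre_) the weight of the start stack is below it
def segFuelA (dic : List (Int × List Int)) : Nat :=
  (pvMaxDeg dic + 1) ^ pvChainBnd dic + 1

def segmentUnion (string : String) (dic : List (Int × List Int)) : Bool :=
  let targetlength : Int := PySem.Str.len string
  if (pvLookup dic 0).isNone then false
  else segLoopA dic targetlength (segFuelA dic) [0]

-- ===== PORT B =====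
-- one round of Source B's inner loops: the set of new positions reached from the frontier
def segNext (dic : List (Int × List Int)) (n : Int)
    (reach frontier : PySem.Set Int) : PySem.Set Int :=
  frontier.foldl (fun acc c =>
      if c = n then acc
      else (pvSuccs dic c).foldl
        (fun a j => if PySem.Set.contains reach j then a else PySem.Set.add a j) acc)
    PySem.Set.empty

-- the while-loop of Source B; fuel pvBound+1 is never exhausted (each productive
-- round adds at least one new position to reach, and reach ⊆ {0} ∪ values)
def segLoopB (dic : List (Int × List Int)) (n : Int) :
    Nat → PySem.Set Int → PySem.Set Int → PySem.Set Int
  | 0, reach, _ => reach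
  | _ + 1, reach, [] => reach                              -- while frontier:
  | f + 1, reach, c0 :: cs =>
      segLoopB dic n f
        (PySem.Set.union reach (segNext dic n reach (c0 :: cs)))   -- reach |= nxt
        (segNext dic n reach (c0 :: cs))                           -- frontier = nxt

def segmentUnion_alt (string : String) (dic : List (Int × List Int)) : Bool :=
  let n : Int := PySem.Str.len string
  if (pvLookup dic 0).isNone then false
  else
    PySem.Set.contains
      (segLoopB dic n (pvBound dic + 1) (PySem.Set.ofList [0]) (PySem.Set.ofList [0])) n

-- ===== PRECONDITION & SPEC =====
-- one peeling round: keep exactly the keys that still have an edge to a kept key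
def pvPeelStep (dic : List (Int × List Int)) (n : Int) (s : List Int) : List Int :=
  s.filter (fun c => decide (c ≠ n) && (pvSuccs dic c).any (fun j => decide (j ∈ s)))

def pvPeel (dic : List (Int × List Int)) (n : Int) : Nat → List Int → List Int
  | 0, s => s
  | k + 1, s => pvPeel dic n k (pvPeelStep dic n s)

-- Pre_ excludes dics with key 0 whose position graph has a cycle (some keys survive
-- peeling, i.e. repeatedly discarding keys with no edge into the remaining keys —
-- the standard decidable statement of acyclicity, a property of the input graph,
-- not a run of either algorithm): A's visited-less DFS can run forever there; on
-- every such input where A does terminate it returns the same value as B, so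
-- nothing matchable is hidden.
def Pre_segmentUnion (string : String) (dic : List (Int × List Int)) : Prop :=
  pvLookup dic 0 = none ∨
  pvPeel dic (PySem.Str.len string) (pvRounds dic) (pvKeys dic) = []
instance (string : String) (dic : List (Int × List Int)) : Decidable (Pre_segmentUnion string dic) := by
  unfold Pre_segmentUnion; infer_instance

def pvWitness_segmentUnion : String × (List (Int × List Int)) := ("ab", [(0, [1]), (1, [2])])

def Spec_segmentUnion (string : String) (dic : List (Int × List Int)) (out : Bool) : Prop := out = segmentUnion_alt string dic
instance (string : String) (dic : List (Int × List Int)) (out : Bool) : Decidable (Spec_segmentUnion string dic out) := by unfold Spec_segmentUnion; infer_instance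

-- ===== CLAIM (what is proved, stated in full; the proofs are below) =====
def Claim_equal_segmentUnion : Prop := ∀ (string : String) (dic : List (Int × List Int)), Dom_segmentUnion string dic → Pre_segmentUnion string dic → Spec_segmentUnion string dic (segmentUnion string dic)

-- ===== LEMMAS AND PROOFS =====

-- reachability towards n: SegReach c ↔ some successor path from c hits n
inductive SegReach (dic : List (Int × List Int)) (n : Int) : Int → Prop
  | base : SegReach dic n n
  | step {c js j} : pvLookup dic c = some js → j ∈ js → SegReach dic n j → SegReach dic n c

-- reachability from 0, never expanding n (what B's saturation computes)
inductive R0 (dic : List (Int × List Int)) (n : Int) : Int → Prop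
  | base : R0 dic n 0
  | step {c js j} : R0 dic n c → c ≠ n → pvLookup dic c = some js → j ∈ js → R0 dic n j

-- a successor path (list of successive nodes) starting at c, never expanding n
def ChainP (dic : List (Int × List Int)) (n : Int) : Int → List Int → Prop
  | _, [] => True
  | c, j :: rest => c ≠ n ∧ ∃ js, pvLookup dic c = some js ∧ j ∈ js ∧ ChainP dic n j rest

theorem mem_of_lookup_eq_some {dic : List (Int × List Int)} {c : Int} {js : List Int}
    (h : pvLookup dic c = some js) : (c, js) ∈ dic := by
  induction dic with
  | nil => simp [pvLookup, PySem.Dict.get?] at h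
  | cons p rest ih =>
      rw [pvLookup] at h ih
      rw [show PySem.Dict.mk (p :: rest) = PySem.Dict.mk ((p.1, p.2) :: rest) by rfl,
        PySem.Dict.get?_mk_cons] at h
      by_cases hpc : p.1 = c
      · simp [hpc] at h
        have hp : p = (c, js) := by cases p; simp_all
        rw [hp]; exact List.mem_cons_self
      · simp [hpc] at h; right; exact ih h

theorem segReach_not_key {dic : List (Int × List Int)} {n c : Int}
    (hc : c ≠ n) (h : pvLookup dic c = none) : ¬ SegReach dic n c := by
  intro hr; cases hr with
  | base => exact hc rfl
  | step hl _ _ => rw [h] at hl; cases hl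

theorem segReach_key_iff {dic : List (Int × List Int)} {n c : Int} {js : List Int}
    (hc : c ≠ n) (h : pvLookup dic c = some js) :
    SegReach dic n c ↔ ∃ j ∈ js, SegReach dic n j := by
  constructor
  · intro hr; cases hr with
    | base => exact absurd rfl hc
    | step hl hj hr' => rw [h] at hl; cases hl; exact ⟨_, hj, hr'⟩
  · rintro ⟨j, hj, hr⟩; exact .step h hj hr

-- ---- bridge between the two reachability notions ----
theorem r0_to_segReach {dic : List (Int × List Int)} {n : Int}
    (h : R0 dic n n) : SegReach dic n 0 := by
  have key : ∀ x, R0 dic n x → SegReach dic n x → SegReach dic n 0 := by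
    intro x hx
    induction hx with
    | base => exact id
    | step _ _ hl hj ih => exact fun hr => ih (.step hl hj hr)
  exact key n h .base

theorem segReach_to_r0 {dic : List (Int × List Int)} {n : Int}
    (h : SegReach dic n 0) : R0 dic n n := by
  have key : ∀ x, SegReach dic n x → R0 dic n x → R0 dic n n := by
    intro x hx
    induction hx with
    | base => exact id
    | @step c js j hl hj _ ih =>
        intro hc
        by_cases hcn : c = n
        · exact hcn ▸ hc
        · exact ih (.step hc hcn hl hj)
  exact key 0 h .base

-- ---- peeling: Pre_'s emptiness bounds every chain ----

-- heads of chains of length ≥ k survive k-1 peeling rounds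
def PeelInv (dic : List (Int × List Int)) (n : Int) (s : List Int) (k : Nat) : Prop :=
  ∀ c p, ChainP dic n c p → k ≤ p.length → c ∈ s

theorem peelInv_step {dic : List (Int × List Int)} {n : Int} {s : List Int} {k : Nat}
    (h : PeelInv dic n s k) : PeelInv dic n (pvPeelStep dic n s) (k + 1) := by
  intro c p hch hlen
  cases p with
  | nil => simp at hlen
  | cons j rest =>
      obtain ⟨hcn, js, hl, hj, hrest⟩ := hch
      have hc : c ∈ s := h c (j :: rest) ⟨hcn, js, hl, hj, hrest⟩ (by omega)
      have hjs : j ∈ s := h j rest hrest (by simp at hlen; omega)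
      rw [pvPeelStep, List.mem_filter]
      refine ⟨hc, ?_⟩
      simp only [Bool.and_eq_true, decide_eq_true_eq, List.any_eq_true]
      exact ⟨hcn, j, by simp [pvSuccs, hl, hj], by simp [hjs]⟩

theorem peel_inv {dic : List (Int × List Int)} {n : Int} :
    ∀ (k : Nat) (s : List Int) (m : Nat),
      PeelInv dic n s m → PeelInv dic n (pvPeel dic n k s) (m + k) := by
  intro k
  induction k with
  | zero => intro s m h; simpa using h
  | succ k ih =>
      intro s m h
      have h1 := peelInv_step h
      have h2 := ih _ _ h1
      have heq : m + (k + 1) = m + 1 + k := by omega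
      rw [heq]
      exact h2

theorem keys_peelInv {dic : List (Int × List Int)} {n : Int} :
    PeelInv dic n (pvKeys dic) 1 := by
  intro c p hch hlen
  cases p with
  | nil => simp at hlen
  | cons j rest =>
      obtain ⟨-, js, hl, -, -⟩ := hch
      exact List.mem_map.mpr ⟨(c, js), mem_of_lookup_eq_some hl, rfl⟩

-- under Pre_'s acyclicity there is no successor chain of length pvChainBnd
theorem no_long_chain {dic : List (Int × List Int)} {n : Int}
    (hpre : pvPeel dic n (pvRounds dic) (pvKeys dic) = []) :
    ∀ (c : Int) (p : List Int), ChainP dic n c p → p.length ≠ pvChainBnd dic := by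
  intro c p hch hlen
  have h := peel_inv (pvRounds dic) (pvKeys dic) 1 keys_peelInv c p hch
    (by rw [hlen, pvChainBnd]; omega)
  rw [hpre] at h
  exact absurd h (List.not_mem_nil)

-- ---- the truncated path-tree weight ----
-- on a cycle-free graph it satisfies Wt c = 1 + Σ_{j ∈ succs c} Wt j,
-- which makes segFuelA a sufficient fuel for A's loop
def pvWt (dic : List (Int × List Int)) (n : Int) : Nat → Int → Nat
  | 0, _ => 1
  | k + 1, c =>
      if c = n then 1
      else match pvLookup dic c with
        | some js => 1 + (js.map (fun j => pvWt dic n k j)).sum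
        | none => 1

theorem pvWt_le {dic : List (Int × List Int)} {n : Int} :
    ∀ (k : Nat) (c : Int), pvWt dic n k c ≤ (pvMaxDeg dic + 1) ^ k := by
  intro k
  induction k with
  | zero => intro c; simp [pvWt]
  | succ k ih =>
      intro c
      have hpow : 1 ≤ (pvMaxDeg dic + 1) ^ k := Nat.one_le_pow _ _ (by omega)
      by_cases hcn : c = n
      · simp only [pvWt, hcn, if_true]
        calc 1 ≤ (pvMaxDeg dic + 1) ^ k := hpow
          _ ≤ (pvMaxDeg dic + 1) ^ (k + 1) := Nat.pow_le_pow_right (by omega) (by omega)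
      · cases hl : pvLookup dic c with
        | none =>
            simp only [pvWt, hcn, if_false, hl]
            calc 1 ≤ (pvMaxDeg dic + 1) ^ k := hpow
              _ ≤ (pvMaxDeg dic + 1) ^ (k + 1) := Nat.pow_le_pow_right (by omega) (by omega)
        | some js =>
            simp only [pvWt, hcn, if_false, hl]
            have hdeg : js.length ≤ pvMaxDeg dic :=
              (PySem.List.le_foldl_max (dic.map (fun p => p.2.length)) 0).2 _
                (List.mem_map.mpr ⟨(c, js), mem_of_lookup_eq_some hl, rfl⟩)
            have hsum : (js.map (fun j => pvWt dic n k j)).sum ≤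
                js.length * (pvMaxDeg dic + 1) ^ k := by
              calc (js.map (fun j => pvWt dic n k j)).sum
                  ≤ (js.map (fun j => pvWt dic n k j)).length • ((pvMaxDeg dic + 1) ^ k) :=
                    List.sum_le_card_nsmul _ _ (by
                      intro w hw
                      obtain ⟨j, _, rfl⟩ := List.mem_map.mp hw
                      exact ih j)
                _ = js.length * (pvMaxDeg dic + 1) ^ k := by simp [smul_eq_mul]
            have : (pvMaxDeg dic + 1) ^ (k + 1) =
                (pvMaxDeg dic + 1) ^ k + pvMaxDeg dic * (pvMaxDeg dic + 1) ^ k := by ring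
            have hmul : js.length * (pvMaxDeg dic + 1) ^ k ≤
                pvMaxDeg dic * (pvMaxDeg dic + 1) ^ k :=
              Nat.mul_le_mul_right _ hdeg
            omega

-- ---- truncated weights stabilise below the chain bound ----
theorem pvWt_stab {dic : List (Int × List Int)} {n : Int} :
    ∀ (k m : Nat) (c : Int), k ≤ m →
      (∀ p : List Int, ChainP dic n c p → p.length ≠ k) →
      pvWt dic n m c = pvWt dic n k c := by
  intro k
  induction k with
  | zero =>
      intro m c _ hno
      exact absurd rfl (hno [] trivial)
  | succ k ih =>
      intro m c hkm hno
      obtain ⟨m', rfl⟩ : ∃ m', m = m' + 1 := ⟨m - 1, by omega⟩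
      by_cases hcn : c = n
      · simp [pvWt, hcn]
      · cases hl : pvLookup dic c with
        | none => simp [pvWt, hcn, hl]
        | some js =>
            simp only [pvWt, hcn, if_false, hl]
            refine congrArg (fun t => 1 + t) (congrArg List.sum (List.map_congr_left ?_))
            intro j hj
            apply ih m' j (by omega)
            intro p hp hplen
            exact hno (j :: p) ⟨hcn, js, hl, hj, hp⟩ (by simp [hplen])

-- the exact weight recurrence on a cycle-free graph
theorem pvW_rec {dic : List (Int × List Int)} {n : Int}
    (hno : ∀ (c : Int) (p : List Int), ChainP dic n c p → p.length ≠ pvChainBnd dic)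
    {c : Int} {js : List Int} (hcn : c ≠ n) (hl : pvLookup dic c = some js) :
    pvWt dic n (pvChainBnd dic) c = 1 + (js.map (fun j => pvWt dic n (pvChainBnd dic) j)).sum := by
  have h1 : pvWt dic n (pvChainBnd dic + 1) c = pvWt dic n (pvChainBnd dic) c :=
    pvWt_stab (pvChainBnd dic) (pvChainBnd dic + 1) c (by omega)
      (fun p hp => hno c p hp)
  rw [← h1]
  simp [pvWt, hcn, hl]

theorem pvWt_pos (dic : List (Int × List Int)) (n : Int) (k : Nat) (c : Int) :
    1 ≤ pvWt dic n k c := by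
  cases k with
  | zero => simp [pvWt]
  | succ k =>
      by_cases hcn : c = n
      · simp [pvWt, hcn]
      · cases hl : pvLookup dic c with
        | none => simp [pvWt, hcn, hl]
        | some js => simp [pvWt, hcn, hl]

def segWsum (dic : List (Int × List Int)) (n : Int) (stack : List Int) : Nat :=
  (stack.map (fun c => pvWt dic n (pvChainBnd dic) c)).sum

theorem segWsum_append (dic : List (Int × List Int)) (n : Int) (a b : List Int) :
    segWsum dic n (a ++ b) = segWsum dic n a + segWsum dic n b := by
  simp [segWsum]

-- A's loop computes reachability-to-n when the fuel exceeds the weight of the stack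
theorem segLoopA_correct {dic : List (Int × List Int)} {n : Int}
    (hno : ∀ (c : Int) (p : List Int), ChainP dic n c p → p.length ≠ pvChainBnd dic) :
    ∀ (f : Nat) (stack : List Int), segWsum dic n stack < f →
      (segLoopA dic n f stack = true ↔ ∃ c ∈ stack, SegReach dic n c) := by
  intro f
  induction f with
  | zero => intro stack h; omega
  | succ f ih =>
      intro stack h
      match stack with
      | [] => simp [segLoopA]
      | x :: xs =>
        have hne : x :: xs ≠ [] := List.cons_ne_nil x xs
        rw [segLoopA]
        set cur := (x :: xs).getLast hne with hcur
        set rest := (x :: xs).dropLast with hrest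
        have hst : rest ++ [cur] = x :: xs := List.dropLast_append_getLast hne
        have hsum : segWsum dic n (x :: xs) = segWsum dic n rest + pvWt dic n (pvChainBnd dic) cur := by
          rw [← hst, segWsum_append]; simp [segWsum]
        have hmemiff : (∃ c ∈ x :: xs, SegReach dic n c) ↔
            (∃ c ∈ rest, SegReach dic n c) ∨ SegReach dic n cur := by
          rw [← hst]
          constructor
          · rintro ⟨c, hc, hr⟩
            rcases List.mem_append.mp hc with hc | hc
            · exact Or.inl ⟨c, hc, hr⟩
            · obtain rfl := List.mem_singleton.mp hc
              exact Or.inr hr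
          · rintro (⟨c, hc, hr⟩ | hr)
            · exact ⟨c, List.mem_append.mpr (Or.inl hc), hr⟩
            · exact ⟨cur, List.mem_append.mpr (Or.inr (List.mem_singleton.mpr rfl)), hr⟩
        by_cases hcn : cur = n
        · rw [if_pos hcn]
          constructor
          · intro _; exact hmemiff.mpr (Or.inr (hcn ▸ SegReach.base))
          · intro _; rfl
        · rw [if_neg hcn]
          cases hlk : pvLookup dic cur with
          | some js =>
              have hwrec := pvW_rec hno hcn hlk
              have hlt : segWsum dic n (rest ++ js) < f := by
                rw [segWsum_append]
                have hjs : segWsum dic n js = (js.map (fun j => pvWt dic n (pvChainBnd dic) j)).sum := rfl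
                omega
              rw [ih _ hlt, hmemiff, segReach_key_iff hcn hlk]
              constructor
              · rintro ⟨c, hc, hr⟩
                rcases List.mem_append.mp hc with hc | hc
                · exact Or.inl ⟨c, hc, hr⟩
                · exact Or.inr ⟨c, hc, hr⟩
              · rintro (⟨c, hc, hr⟩ | ⟨c, hc, hr⟩)
                · exact ⟨c, List.mem_append.mpr (Or.inl hc), hr⟩
                · exact ⟨c, List.mem_append.mpr (Or.inr hc), hr⟩
          | none =>
              have hw := pvWt_pos dic n (pvChainBnd dic) cur
              have hlt : segWsum dic n rest < f := by omega
              rw [ih _ hlt, hmemiff]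
              have hnr : ¬ SegReach dic n cur := segReach_not_key hcn hlk
              exact (or_iff_left hnr).symm

-- ---- B side ----

-- membership in the inner fold building nxt from one frontier member
theorem mem_inner_fold {reach : PySem.Set Int} :
    ∀ (js : List Int) (acc : PySem.Set Int) (x : Int),
      x ∈ js.foldl (fun a j => if PySem.Set.contains reach j then a else PySem.Set.add a j) acc ↔
      x ∈ acc ∨ (x ∈ js ∧ x ∉ reach) := by
  intro js
  induction js with
  | nil => intro acc x; simp
  | cons j rest ih =>
      intro acc x
      rw [List.foldl_cons]
      by_cases hj : PySem.Set.contains reach j = true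
      · have hjr : j ∈ reach := (PySem.Set.contains_iff _ _).mp hj
        rw [if_pos hj, ih]
        constructor
        · rintro (h | ⟨h1, h2⟩)
          · exact Or.inl h
          · exact Or.inr ⟨List.mem_cons_of_mem _ h1, h2⟩
        · rintro (h | ⟨h1, h2⟩)
          · exact Or.inl h
          · rcases List.mem_cons.mp h1 with rfl | h1'
            · exact absurd hjr h2
            · exact Or.inr ⟨h1', h2⟩
      · have hjr : j ∉ reach := fun hm => hj ((PySem.Set.contains_iff _ _).mpr hm)
        rw [if_neg hj, ih]
        simp only [PySem.Set.mem_add]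
        constructor
        · rintro ((h | rfl) | ⟨h1, h2⟩)
          · exact Or.inl h
          · exact Or.inr ⟨List.mem_cons_self, hjr⟩
          · exact Or.inr ⟨List.mem_cons_of_mem _ h1, h2⟩
        · rintro (h | ⟨h1, h2⟩)
          · exact Or.inl (Or.inl h)
          · rcases List.mem_cons.mp h1 with rfl | h1'
            · exact Or.inl (Or.inr rfl)
            · exact Or.inr ⟨h1', h2⟩

-- membership in segNext
theorem mem_segNext {dic : List (Int × List Int)} {n : Int} {reach : PySem.Set Int} :
    ∀ (fr : List Int) (x : Int),
      x ∈ segNext dic n reach fr ↔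
      ∃ c ∈ fr, c ≠ n ∧ x ∈ pvSuccs dic c ∧ x ∉ reach := by
  have key : ∀ (fr : List Int) (acc : PySem.Set Int) (x : Int),
      x ∈ fr.foldl (fun acc c =>
          if c = n then acc
          else (pvSuccs dic c).foldl
            (fun a j => if PySem.Set.contains reach j then a else PySem.Set.add a j) acc) acc ↔
      x ∈ acc ∨ ∃ c ∈ fr, c ≠ n ∧ x ∈ pvSuccs dic c ∧ x ∉ reach := by
    intro fr
    induction fr with
    | nil => intro acc x; simp
    | cons c rest ih =>
        intro acc x
        rw [List.foldl_cons]
        by_cases hcn : c = n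
        · rw [if_pos hcn, ih]
          constructor
          · rintro (h | ⟨c', h1, h2, h3, h4⟩)
            · exact Or.inl h
            · exact Or.inr ⟨c', List.mem_cons_of_mem _ h1, h2, h3, h4⟩
          · rintro (h | ⟨c', h1, h2, h3, h4⟩)
            · exact Or.inl h
            · rcases List.mem_cons.mp h1 with rfl | h1'
              · exact absurd hcn h2
              · exact Or.inr ⟨c', h1', h2, h3, h4⟩
        · rw [if_neg hcn, ih, mem_inner_fold]
          constructor
          · rintro ((h | ⟨h1, h2⟩) | ⟨c', h1, h2, h3, h4⟩)
            · exact Or.inl h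
            · exact Or.inr ⟨c, List.mem_cons_self, hcn, h1, h2⟩
            · exact Or.inr ⟨c', List.mem_cons_of_mem _ h1, h2, h3, h4⟩
          · rintro (h | ⟨c', h1, h2, h3, h4⟩)
            · exact Or.inl (Or.inl h)
            · rcases List.mem_cons.mp h1 with rfl | h1'
              · exact Or.inl (Or.inr ⟨h3, h4⟩)
              · exact Or.inr ⟨c', h1', h2, h3, h4⟩
  intro fr x
  rw [segNext, key]
  simp [PySem.Set.empty]

-- an empty frontier returns reach whatever the fuel is
theorem segLoopB_nil (dic : List (Int × List Int)) (n : Int) :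
    ∀ (f : Nat) (reach : PySem.Set Int), segLoopB dic n f reach [] = reach := by
  intro f reach
  cases f <;> rfl

-- a nodup list of ints contained in {0} ∪ values has length ≤ pvBound
theorem reach_length_le {dic : List (Int × List Int)} {r : List Int}
    (hn : r.Nodup) (hs : ∀ x ∈ r, x = 0 ∨ x ∈ pvVals dic) : r.length ≤ pvBound dic := by
  have hsub : ∀ x ∈ r, x ∈ (0 :: pvVals dic) := by
    intro x hx
    rcases hs x hx with rfl | h
    · exact List.mem_cons_self
    · exact List.mem_cons_of_mem _ h
  calc r.length = r.toFinset.card := (List.toFinset_card_of_nodup hn).symm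
    _ ≤ (0 :: pvVals dic).toFinset.card := by
        apply Finset.card_le_card
        intro x hx
        exact List.mem_toFinset.mpr (hsub x (List.mem_toFinset.mp hx))
    _ ≤ (0 :: pvVals dic).length := List.toFinset_card_le _
    _ = pvBound dic := by simp [pvBound]

-- the invariant carried through B's loop
def SegInvB (dic : List (Int × List Int)) (n : Int) (reach frontier : PySem.Set Int) : Prop :=
  (∀ x ∈ reach, R0 dic n x) ∧
  (∀ x ∈ frontier, x ∈ reach) ∧
  (∀ x ∈ reach, x ∉ frontier → x ≠ n → ∀ js, pvLookup dic x = some js → ∀ j ∈ js, j ∈ reach) ∧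
  (0 : Int) ∈ reach ∧
  reach.Nodup ∧
  (∀ x ∈ reach, x = 0 ∨ x ∈ pvVals dic)

-- what the loop's result satisfies
def SegOutB (dic : List (Int × List Int)) (n : Int) (r : PySem.Set Int) : Prop :=
  (∀ x ∈ r, R0 dic n x) ∧ (0 : Int) ∈ r ∧
  (∀ x ∈ r, x ≠ n → ∀ js, pvLookup dic x = some js → ∀ j ∈ js, j ∈ r)

theorem segOutB_mem_iff {dic : List (Int × List Int)} {n : Int} {r : PySem.Set Int}
    (h : SegOutB dic n r) : ∀ x, x ∈ r ↔ R0 dic n x := by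
  obtain ⟨h1, h2, h3⟩ := h
  intro x
  constructor
  · exact h1 x
  · intro hx
    induction hx with
    | base => exact h2
    | step hc hcn hl hj ih => exact h3 _ ih hcn _ hl _ hj

-- the invariant is preserved by one round
theorem segInvB_step {dic : List (Int × List Int)} {n : Int}
    {reach frontier : PySem.Set Int} (hinv : SegInvB dic n reach frontier) :
    SegInvB dic n (PySem.Set.union reach (segNext dic n reach frontier))
      (segNext dic n reach frontier) := by
  obtain ⟨hr0, hfr, hcl, h0, hnd, hsub⟩ := hinv
  set nxt := segNext dic n reach frontier with hnxt
  have hmem_nxt : ∀ x, x ∈ nxt ↔ ∃ c ∈ frontier, c ≠ n ∧ x ∈ pvSuccs dic c ∧ x ∉ reach :=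
    fun x => mem_segNext frontier x
  have hmem_union : ∀ x, x ∈ PySem.Set.union reach nxt ↔ x ∈ reach ∨ x ∈ nxt :=
    fun x => PySem.Set.mem_union _ _ _
  refine ⟨?_, ?_, ?_, ?_, ?_, ?_⟩
  · intro x hx
    rcases (hmem_union x).mp hx with hx | hx
    · exact hr0 x hx
    · obtain ⟨c, hc, hcn, hxc, _⟩ := (hmem_nxt x).mp hx
      obtain ⟨js, hjs⟩ : ∃ js, pvLookup dic c = some js := by
        rcases h : pvLookup dic c with _ | js
        · simp [pvSuccs, h] at hxc
        · exact ⟨js, rfl⟩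
      have hxjs : x ∈ js := by simpa [pvSuccs, hjs] using hxc
      exact R0.step (hr0 c (hfr c hc)) hcn hjs hxjs
  · intro x hx
    exact (hmem_union x).mpr (Or.inr hx)
  · intro x hx hxnxt hxn js hl j hj
    rcases (hmem_union x).mp hx with hxr | hxnxt'
    · by_cases hxfr : x ∈ frontier
      · by_cases hjr : j ∈ reach
        · exact (hmem_union j).mpr (Or.inl hjr)
        · refine (hmem_union j).mpr (Or.inr ?_)
          exact (hmem_nxt j).mpr ⟨x, hxfr, hxn, by simp [pvSuccs, hl, hj], hjr⟩
      · exact (hmem_union j).mpr (Or.inl (hcl x hxr hxfr hxn js hl j hj))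
    · exact absurd hxnxt' hxnxt
  · exact (hmem_union 0).mpr (Or.inl h0)
  · exact PySem.Set.nodup_union _ _ hnd
  · intro x hx
    rcases (hmem_union x).mp hx with hx | hx
    · exact hsub x hx
    · obtain ⟨c, hc, hcn, hxc, _⟩ := (hmem_nxt x).mp hx
      obtain ⟨js, hjs⟩ : ∃ js, pvLookup dic c = some js := by
        rcases h : pvLookup dic c with _ | js
        · simp [pvSuccs, h] at hxc
        · exact ⟨js, rfl⟩
      have hxjs : x ∈ js := by simpa [pvSuccs, hjs] using hxc
      exact Or.inr (List.mem_flatMap.mpr ⟨(c, js), mem_of_lookup_eq_some hjs, hxjs⟩)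

theorem segLoopB_correct {dic : List (Int × List Int)} {n : Int} :
    ∀ (f : Nat) (reach frontier : PySem.Set Int),
      SegInvB dic n reach frontier →
      pvBound dic + 1 ≤ f + reach.length →
      SegOutB dic n (segLoopB dic n f reach frontier) := by
  intro f
  induction f with
  | zero =>
      intro reach frontier hinv hf
      obtain ⟨_, _, _, _, hnd, hsub⟩ := hinv
      have := reach_length_le hnd hsub
      omega
  | succ f ih =>
      intro reach frontier hinv hf
      match frontier with
      | [] =>
          obtain ⟨hr0, _, hcl, h0, _, _⟩ := hinv
          rw [segLoopB_nil]
          exact ⟨hr0, h0, fun x hx hxn js hl j hj => hcl x hx (by simp) hxn js hl j hj⟩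
      | c0 :: cs =>
          rw [segLoopB]
          have hinv' := segInvB_step hinv
          cases hnx : segNext dic n reach (c0 :: cs) with
          | nil =>
              rw [hnx] at hinv'
              rw [segLoopB_nil]
              obtain ⟨i1, _, i3, i4, _, _⟩ := hinv'
              exact ⟨i1, i4, fun x hx hxn js hl j hj =>
                i3 x hx (by simp) hxn js hl j hj⟩
          | cons y ys =>
              rw [hnx] at hinv'
              apply ih _ _ hinv'
              -- the union strictly grew: y is a new element
              have hy : y ∈ segNext dic n reach (c0 :: cs) := by
                rw [hnx]; exact List.mem_cons_self
              obtain ⟨c, hc, hcn, hyc, hynotr⟩ := (mem_segNext _ y).mp hy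
              obtain ⟨_, _, _, _, hnd, _⟩ := hinv
              have hmem_union : ∀ x, x ∈ PySem.Set.union reach (y :: ys) ↔ x ∈ reach ∨ x ∈ y :: ys :=
                fun x => PySem.Set.mem_union _ _ _
              have hnd' : (PySem.Set.union reach (y :: ys)).Nodup := PySem.Set.nodup_union _ _ hnd
              have hlen : reach.length + 1 ≤ (PySem.Set.union reach (y :: ys)).length := by
                have hy' : y ∈ PySem.Set.union reach (y :: ys) :=
                  (hmem_union y).mpr (Or.inr List.mem_cons_self)
                have hcard : (reach.toFinset ∪ {y}).card ≤ (PySem.Set.union reach (y :: ys)).toFinset.card := by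
                  apply Finset.card_le_card
                  intro x hx
                  rcases Finset.mem_union.mp hx with hx | hx
                  · exact List.mem_toFinset.mpr
                      ((hmem_union x).mpr (Or.inl (List.mem_toFinset.mp hx)))
                  · rw [Finset.mem_singleton.mp hx]; exact List.mem_toFinset.mpr hy'
                have hcard2 : reach.toFinset.card + 1 = (reach.toFinset ∪ {y}).card := by
                  rw [Finset.union_comm, Finset.singleton_union,
                    Finset.card_insert_of_notMem (fun h => hynotr (List.mem_toFinset.mp h))]
                calc reach.length + 1 = reach.toFinset.card + 1 := by
                      rw [List.toFinset_card_of_nodup hnd]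
                  _ = (reach.toFinset ∪ {y}).card := hcard2
                  _ ≤ (PySem.Set.union reach (y :: ys)).toFinset.card := hcard
                  _ = (PySem.Set.union reach (y :: ys)).length := List.toFinset_card_of_nodup hnd'
              omega

-- ===== VERDICT (by name: the statement is the Claim_ definition above) =====
theorem segmentUnion_spec : Claim_equal_segmentUnion := by
  intro string dic _ hpre
  unfold Spec_segmentUnion segmentUnion segmentUnion_alt
  by_cases h0 : pvLookup dic 0 = none
  · simp [h0]
  · obtain ⟨js0, hjs0⟩ := Option.ne_none_iff_exists'.mp h0
    have hacyc : pvPeel dic (PySem.Str.len string) (pvRounds dic) (pvKeys dic) = [] := by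
      rcases hpre with h | h
      · exact absurd h h0
      · exact h
    set n := PySem.Str.len string with hn
    simp only [hjs0, Option.isNone_some, Bool.false_eq_true, if_false]
    -- A's side
    have hfuel : segWsum dic n [0] < segFuelA dic := by
      have hle := pvWt_le (dic := dic) (n := n) (pvChainBnd dic) 0
      simp only [segWsum, segFuelA, List.map_cons, List.map_nil, List.sum_cons,
        List.sum_nil, Nat.add_zero]
      omega
    have hA : segLoopA dic n (segFuelA dic) [0] = true ↔ SegReach dic n 0 := by
      rw [segLoopA_correct (no_long_chain hacyc) _ _ hfuel]
      simp
    -- B's side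
    have hinv0 : SegInvB dic n (PySem.Set.ofList [0]) (PySem.Set.ofList [0]) := by
      refine ⟨?_, ?_, ?_, ?_, ?_, ?_⟩
      · intro x hx
        have : x = 0 := by simpa [PySem.Set.mem_ofList] using hx
        exact this ▸ R0.base
      · exact fun x hx => hx
      · intro x hx hxf
        exact absurd hx hxf
      · simp [PySem.Set.mem_ofList]
      · exact PySem.Set.nodup_ofList _
      · intro x hx
        have : x = 0 := by simpa [PySem.Set.mem_ofList] using hx
        exact Or.inl this
    have hout : SegOutB dic n (segLoopB dic n (pvBound dic + 1) (PySem.Set.ofList [0]) (PySem.Set.ofList [0])) := by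
      apply segLoopB_correct _ _ _ hinv0
      have h1 : (PySem.Set.ofList [(0:Int)]).length = 1 := rfl
      omega
    have hB : PySem.Set.contains (segLoopB dic n (pvBound dic + 1) (PySem.Set.ofList [0]) (PySem.Set.ofList [0])) n = true ↔ R0 dic n n := by
      rw [PySem.Set.contains_iff]
      exact segOutB_mem_iff hout n
    -- glue
    cases ht : segLoopA dic n (segFuelA dic) [0] with
    | true =>
        exact (hB.mpr (segReach_to_r0 (hA.mp ht))).symm
    | false =>
        cases ht2 : PySem.Set.contains (segLoopB dic n (pvBound dic + 1) (PySem.Set.ofList [0]) (PySem.Set.ofList [0])) n with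
        | false => rfl
        | true =>
            have := hA.mpr (r0_to_segReach (hB.mp ht2))
            rw [ht] at this; cases this
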